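-- pv_equiv track=rewrite | github.com/jun311k/SparseTransformerArchitecture | spt_row.py | partition_rows
-- ===== SOURCE A (Python) =====
-- def partition_rows(n_rows, n_partitions):
--     sizes = [(n_rows + i) // n_partitions for i in range(n_partitions)]
--     parts = []
--     start = 0
--     for i in sizes:
--         parts.append(list(range(start, start + i)))
--         start += i
--     return parts
-- ===== SOURCE B (Python) =====
-- def partition_rows(n_rows, n_partitions):
--     if n_partitions <= 0:
--         return []
--     q, r = divmod(n_rows, n_partitions)
--     def start(i):
--         return i * q + max(0, i - (n_partitions - r))
--     return [list(range(start(i), start(i + 1))) for i in range(n_partitions)]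
-- ===== Notes on version B (the rewrite author's own statement) =====
-- stated objective: alternative
-- what changed: B replaces A's per-partition sizes list and running-start accumulation with one divmod and a closed-form start offset start_i = i*q + max(0, i-(p-r)), building each partition directly as range(start_i, start_{i+1}).
import Mathlib
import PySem

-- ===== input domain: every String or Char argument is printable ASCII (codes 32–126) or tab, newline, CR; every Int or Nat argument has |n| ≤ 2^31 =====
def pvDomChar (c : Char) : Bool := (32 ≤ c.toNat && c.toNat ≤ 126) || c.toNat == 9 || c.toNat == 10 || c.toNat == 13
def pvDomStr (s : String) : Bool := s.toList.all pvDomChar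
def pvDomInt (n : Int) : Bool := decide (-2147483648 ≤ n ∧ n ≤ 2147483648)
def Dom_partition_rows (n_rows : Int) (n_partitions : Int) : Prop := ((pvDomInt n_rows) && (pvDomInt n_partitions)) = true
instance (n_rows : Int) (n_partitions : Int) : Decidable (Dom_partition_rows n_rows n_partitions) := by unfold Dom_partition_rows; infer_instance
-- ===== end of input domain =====

-- B replaces A's sizes list and running-start accumulation by a closed-form start offset
-- derived from one divmod (objective: alternative / simpler decomposition; same O(n_rows) output cost).

-- ===== PORT A =====
def partition_rows (n_rows : Int) (n_partitions : Int) : List (List Int) :=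
  let sizes := (PySem.List.pyRange 0 n_partitions 1).map
      (fun i => PySem.Int.floordiv (n_rows + i) n_partitions)
  (sizes.foldl (fun (st : List (List Int) × Int) i =>
      (st.1 ++ [PySem.List.pyRange st.2 (st.2 + i) 1], st.2 + i)) (([] : List (List Int)), (0 : Int))).1

-- ===== PORT B =====
-- start offset of partition i: i*q + max(0, i - (p - r))
def pvStart (q r p i : Int) : Int := i * q + max 0 (i - (p - r))

def partition_rows_alt (n_rows : Int) (n_partitions : Int) : List (List Int) :=
  if n_partitions ≤ 0 then []
  else
    let q := PySem.Int.floordiv n_rows n_partitions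
    let r := PySem.Int.mod n_rows n_partitions
    (PySem.List.pyRange 0 n_partitions 1).map (fun i =>
      PySem.List.pyRange (pvStart q r n_partitions i) (pvStart q r n_partitions (i + 1)) 1)

-- ===== PRECONDITION & SPEC =====
def Spec_partition_rows (n_rows : Int) (n_partitions : Int) (out : List (List Int)) : Prop := out = partition_rows_alt n_rows n_partitions
instance (n_rows : Int) (n_partitions : Int) (out : List (List Int)) : Decidable (Spec_partition_rows n_rows n_partitions out) := by unfold Spec_partition_rows; infer_instance

-- ===== CLAIM (what is proved, stated in full; the proofs are below) =====
def Claim_equal_partition_rows : Prop := ∀ (n_rows : Int) (n_partitions : Int), Dom_partition_rows n_rows n_partitions → Spec_partition_rows n_rows n_partitions (partition_rows n_rows n_partitions)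

-- ===== LEMMAS AND PROOFS =====

-- A's loop, with the accumulator peeled off.
def pvGo : List Int → Int → List (List Int)
  | [], _ => []
  | i :: t, s => PySem.List.pyRange s (s + i) 1 :: pvGo t (s + i)

theorem pv_foldl_eq_go (l : List Int) (acc : List (List Int)) (s : Int) :
    (l.foldl (fun (st : List (List Int) × Int) i =>
      (st.1 ++ [PySem.List.pyRange st.2 (st.2 + i) 1], st.2 + i)) (acc, s)).1
    = acc ++ pvGo l s := by
  induction l generalizing acc s with
  | nil => simp [pvGo]
  | cons i t ih => simp [pvGo, ih]

-- the size of partition i is the difference of successive closed-form starts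
theorem pv_size_eq (n p i : Int) (hp : 0 < p) (hi : 0 ≤ i) (hip : i < p) :
    PySem.Int.floordiv (n + i) p
      = pvStart (PySem.Int.floordiv n p) (PySem.Int.mod n p) p (i + 1)
        - pvStart (PySem.Int.floordiv n p) (PySem.Int.mod n p) p i := by
  set q := PySem.Int.floordiv n p with hq
  set r := PySem.Int.mod n p with hr
  have hn : q * p + r = n := PySem.Int.floordiv_mul_add_mod n p
  have hr0 : 0 ≤ r := PySem.Int.mod_nonneg n hp
  have hrp : r < p := PySem.Int.mod_lt n hp
  rw [PySem.Int.floordiv_eq_iff_of_pos hp]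
  unfold pvStart
  rcases le_or_gt (i + 1 - (p - r)) 0 with h0 | h1
  · -- both maxes are 0: quotient is q
    have e1 : max 0 (i + 1 - (p - r)) = 0 := by omega
    have e2 : max 0 (i - (p - r)) = 0 := by omega
    rw [e1, e2]
    constructor <;> nlinarith
  · rcases le_or_gt 0 (i - (p - r)) with h2 | h3
    · -- both maxes positive: quotient is q, shifted by 1 via the max difference
      have e1 : max 0 (i + 1 - (p - r)) = i + 1 - (p - r) := by omega
      have e2 : max 0 (i - (p - r)) = i - (p - r) := by omega
      rw [e1, e2]
      constructor <;> nlinarith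
    · -- boundary i = p - r - 1 + 1 region: difference of maxes is i+1-(p-r) = 1
      have e1 : max 0 (i + 1 - (p - r)) = i + 1 - (p - r) := by omega
      have e2 : max 0 (i - (p - r)) = 0 := by omega
      have e3 : i + 1 - (p - r) = 1 := by omega
      rw [e1, e2, e3]
      constructor <;> nlinarith

theorem pv_go_eq (n p : Int) (hp : 0 < p) :
    ∀ (m : Nat) (k : Int), 0 ≤ k → k + m = p →
    pvGo ((PySem.List.pyRange k p 1).map
        (fun i => PySem.Int.floordiv (n + i) p))
      (pvStart (PySem.Int.floordiv n p) (PySem.Int.mod n p) p k)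
    = (PySem.List.pyRange k p 1).map (fun i =>
        PySem.List.pyRange (pvStart (PySem.Int.floordiv n p) (PySem.Int.mod n p) p i)
          (pvStart (PySem.Int.floordiv n p) (PySem.Int.mod n p) p (i + 1)) 1) := by
  intro m
  induction m with
  | zero =>
    intro k hk0 hkp
    have : p ≤ k := by omega
    rw [PySem.List.pyRange_one_eq_nil this]
    simp [pvGo]
  | succ m ih =>
    intro k hk0 hkp
    have hklt : k < p := by omega
    rw [PySem.List.pyRange_one_cons hklt]
    simp only [List.map_cons, pvGo]
    have hsz := pv_size_eq n p k hp hk0 hklt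
    have hst : pvStart (PySem.Int.floordiv n p) (PySem.Int.mod n p) p k
        + PySem.Int.floordiv (n + k) p
        = pvStart (PySem.Int.floordiv n p) (PySem.Int.mod n p) p (k + 1) := by omega
    rw [hst, ih (k + 1) (by omega) (by omega)]

-- ===== VERDICT (by name: the statement is the Claim_ definition above) =====
theorem partition_rows_spec : Claim_equal_partition_rows := by
  intro n p _
  unfold Spec_partition_rows partition_rows partition_rows_alt
  by_cases hp : p ≤ 0
  · rw [PySem.List.pyRange_one_eq_nil (by omega : p ≤ 0)]
    simp [hp]
  · have hp' : 0 < p := by omega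
    simp only [hp, if_false]
    rw [pv_foldl_eq_go, List.nil_append]
    have h0 : pvStart (PySem.Int.floordiv n p) (PySem.Int.mod n p) p 0 = 0 := by
      unfold pvStart
      have : max 0 (0 - (p - PySem.Int.mod n p)) = 0 := by
        have := PySem.Int.mod_lt n hp'
        omega
      rw [this]; ring
    have hmain := pv_go_eq n p hp' (p.toNat) 0 le_rfl (by omega)
    rw [h0] at hmain
    exact hmain
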